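-- pv_equiv track=rewrite | github.com/iopoi/network_project_submit | analysis1.py | eachIterationTime
-- ===== SOURCE A (Python) =====
-- from operator import itemgetter
--
-- def eachIterationTime(data):
-- 	returned_list = list()
-- 	d = sorted(data, key=itemgetter(0, 2))
--
-- 	tracker = list()
-- 	current = d[0][0]
-- 	tracker.append(0)
-- 	for n, i in enumerate(d):
-- 		if current != i[0]:
-- 			tracker.append(n)
-- 			current = i[0]
-- 	for n, i in enumerate(tracker[:-1]):
-- 		returned_list.append((n, d[tracker[n + 1]][2] - d[tracker[n]][2]))
-- 	return returned_list
-- ===== SOURCE B (Python) =====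
-- def eachIterationTime(data):
-- 	mins = {}
-- 	for k, _, v in data:
-- 		if k not in mins or v < mins[k]:
-- 			mins[k] = v
-- 	firsts = [mins[k] for k in sorted(mins)]
-- 	return [(n, firsts[n + 1] - firsts[n]) for n in range(len(firsts) - 1)]
-- ===== Notes on version B (the rewrite author's own statement) =====
-- stated objective: alternative
-- what changed: B never sorts the data: one dict pass over the unsorted rows records each key's minimum column-2 value, then only the distinct keys are sorted and consecutive minima are differenced (A sorts all rows by (col0,col2) and walks group-boundary indices).
import Mathlib
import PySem

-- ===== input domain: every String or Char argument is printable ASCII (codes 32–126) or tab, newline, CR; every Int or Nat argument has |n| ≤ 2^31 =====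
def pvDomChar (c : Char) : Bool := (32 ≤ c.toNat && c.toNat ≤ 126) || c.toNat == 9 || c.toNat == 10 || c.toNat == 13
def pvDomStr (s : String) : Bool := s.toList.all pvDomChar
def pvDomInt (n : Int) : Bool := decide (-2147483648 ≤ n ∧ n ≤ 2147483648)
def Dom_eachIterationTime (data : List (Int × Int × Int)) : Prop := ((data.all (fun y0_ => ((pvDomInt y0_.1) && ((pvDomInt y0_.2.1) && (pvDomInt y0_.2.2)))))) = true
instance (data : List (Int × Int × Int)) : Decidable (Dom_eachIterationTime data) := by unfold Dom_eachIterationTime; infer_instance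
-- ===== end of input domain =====

-- B replaces A's full sort of the rows by a single dict pass recording each key's minimum
-- column-2 value (sorting only the distinct keys at the end) — an alternative algorithm.
-- A raises IndexError on empty data (d[0][0]), so Pre_ excludes the empty list; B returns [] there.

-- ===== PORT A =====
-- step of A's first loop: state (tracker, current), input an enumerated pair (n, i)
def pvStepA (st : List Int × Int) (ni : Int × (Int × Int × Int)) : List Int × Int :=
  if st.2 ≠ ni.2.1 then (st.1 ++ [ni.1], ni.2.1) else st

-- A's body after 'd = sorted(data, key=itemgetter(0, 2))'
def pvBodyA (d : List (Int × Int × Int)) : List (Int × Int) :=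
  match PySem.List.pyGet? d 0 with
  | none => []        -- Python raises IndexError here (current = d[0][0]); excluded by Pre_
  | some r0 =>
    let tracker := ((PySem.List.enumerate d 0).foldl pvStepA ([0], r0.1)).1
    -- tracker[n] / tracker[n+1] and d[tracker[…]] are always in range in Python; defaults never hit
    (PySem.List.enumerate (PySem.List.slice tracker none (some (-1))) 0).foldl
      (fun acc ni =>
        acc ++ [(ni.1,
          (PySem.List.pyGetD d (PySem.List.pyGetD tracker (ni.1 + 1) 0) (0, 0, 0)).2.2
          - (PySem.List.pyGetD d (PySem.List.pyGetD tracker ni.1 0) (0, 0, 0)).2.2)]) []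

def eachIterationTime (data : List (Int × Int × Int)) : List (Int × Int) :=
  pvBodyA (PySem.List.sorted2 data (fun r => r.1) (fun r => r.2.2))

-- ===== PORT B =====
-- body of B's dict loop: 'if k not in mins or v < mins[k]: mins[k] = v'
-- (mins[k] on the right is guarded by the short-circuit, so getD's default is never the value used)
def pvStepM (m : PySem.Dict Int Int) (r : Int × Int × Int) : PySem.Dict Int Int :=
  if !(PySem.Dict.contains m r.1) || r.2.2 < PySem.Dict.getD m r.1 0 then
    PySem.Dict.insert m r.1 r.2.2
  else m

def eachIterationTime_alt (data : List (Int × Int × Int)) : List (Int × Int) :=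
  let mins := data.foldl pvStepM PySem.Dict.empty
  -- '[mins[k] for k in sorted(mins)]': k ranges over mins' keys, so mins[k] never raises
  let firsts := (PySem.List.sorted (PySem.Dict.keys mins) (fun k => k) false).map
    (fun k => PySem.Dict.getD mins k 0)
  (PySem.List.pyRange 0 ((firsts.length : Int) - 1) 1).map
    (fun n => (n, PySem.List.pyGetD firsts (n + 1) 0 - PySem.List.pyGetD firsts n 0))

-- ===== PRECONDITION & SPEC =====
-- Pre_ excludes exactly the empty list, on which Python A raises IndexError at d[0][0].
def Pre_eachIterationTime (data : List (Int × Int × Int)) : Prop := data ≠ []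
instance (data : List (Int × Int × Int)) : Decidable (Pre_eachIterationTime data) := by
  unfold Pre_eachIterationTime; infer_instance

def pvWitness_eachIterationTime : (List (Int × Int × Int)) := [(1, 0, 5), (1, 0, 7), (2, 0, 9)]

def Spec_eachIterationTime (data : List (Int × Int × Int)) (out : List (Int × Int)) : Prop := out = eachIterationTime_alt data
instance (data : List (Int × Int × Int)) (out : List (Int × Int)) : Decidable (Spec_eachIterationTime data out) := by unfold Spec_eachIterationTime; infer_instance

-- ===== CLAIM (what is proved, stated in full; the proofs are below) =====
def Claim_equal_eachIterationTime : Prop := ∀ (data : List (Int × Int × Int)), Dom_eachIterationTime data → Pre_eachIterationTime data → Spec_eachIterationTime data (eachIterationTime data)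

-- ===== LEMMAS AND PROOFS =====

-- ---------- the reference: first column-2 value of each group of the sorted list, then diffs ----------

-- scan step collecting each group's first column-2 value (state: firsts, previous key)
def pvStepS (st : List Int × Option Int) (r : Int × Int × Int) : List Int × Option Int :=
  if st.2 ≠ some r.1 then (st.1 ++ [r.2.2], some r.1) else st

-- reference function on the sorted list
def pvRef (d : List (Int × Int × Int)) : List (Int × Int) :=
  let firsts := (d.foldl pvStepS ([], none)).1
  (PySem.List.pyRange 0 ((firsts.length : Int) - 1) 1).map
    (fun n => (n, PySem.List.pyGetD firsts (n + 1) 0 - PySem.List.pyGetD firsts n 0))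

-- column-2 value at (python) index i of d
def pvF (d : List (Int × Int × Int)) (i : Int) : Int :=
  (PySem.List.pyGetD d i (0, 0, 0)).2.2

-- ---------- A reduces to pvRef ----------

-- A's fold only appends to the tracker
theorem pvStepA_prefix (e : List (Int × (Int × Int × Int))) (tr : List Int) (cur : Int) :
    ∃ ext, (e.foldl pvStepA (tr, cur)).1 = tr ++ ext := by
  induction e generalizing tr cur with
  | nil => exact ⟨[], by simp⟩
  | cons p e ih =>
    simp only [List.foldl_cons, pvStepA]
    split
    · obtain ⟨ext, h⟩ := ih (tr ++ [p.1]) p.2.1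
      exact ⟨[p.1] ++ ext, by simp [h]⟩
    · exact ih tr cur

-- state correspondence between A's first loop (indices) and the reference scan (values)
theorem pv_loop_corr (d : List (Int × Int × Int)) (e : List (Int × (Int × Int × Int)))
    (tr : List Int) (cur : Int)
    (he : ∀ p ∈ e, PySem.List.pyGetD d p.1 (0, 0, 0) = p.2) :
    (e.map Prod.snd).foldl pvStepS (tr.map (pvF d), some cur)
      = ((e.foldl pvStepA (tr, cur)).1.map (pvF d), some ((e.foldl pvStepA (tr, cur)).2)) := by
  induction e generalizing tr cur with
  | nil => simp
  | cons p e ih =>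
    have hp := he p (by simp)
    simp only [List.map_cons, List.foldl_cons, pvStepA, pvStepS]
    by_cases h : cur = p.2.1
    · rw [if_neg (show ¬((some cur : Option Int) ≠ some p.2.1) by simp [h]),
         if_neg (show ¬(cur ≠ p.2.1) by simp [h])]
      exact ih tr cur (fun q hq => he q (by simp [hq]))
    · rw [if_pos (show (some cur : Option Int) ≠ some p.2.1 by simp [h]),
         if_pos (show cur ≠ p.2.1 from h)]
      have hmap : (tr.map (pvF d)) ++ [p.2.2.2] = (tr ++ [p.1]).map (pvF d) := by
        simp [pvF, hp]
      rw [hmap]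
      exact ih (tr ++ [p.1]) p.2.1 (fun q hq => he q (by simp [hq]))

-- enumerated tail of r0 :: tl, starting at 1: index matches value
theorem pv_enum_lookup (r0 : Int × Int × Int) (tl : List (Int × Int × Int)) :
    ∀ p ∈ PySem.List.enumerate tl 1, PySem.List.pyGetD (r0 :: tl) p.1 (0, 0, 0) = p.2 := by
  intro p hp
  rw [PySem.List.mem_enumerate_iff] at hp
  obtain ⟨k, hk, rfl⟩ := hp
  have h1 : (1 : Int) + (k : Int) = ((k + 1 : Nat) : Int) := by push_cast; ring
  rw [h1, PySem.List.pyGetD_natCast]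
  simp [List.getD, hk]

-- pyGetD through map, in range
theorem pv_pyGetD_map (t : List Int) (F : Int → Int) (n : Int)
    (h0 : 0 ≤ n) (h1 : n < t.length) :
    PySem.List.pyGetD (t.map F) n 0 = F (PySem.List.pyGetD t n 0) := by
  rw [PySem.List.pyGetD_eq_getElem (t.map F) 0 h0 (by simpa using h1),
      PySem.List.pyGetD_eq_getElem t 0 h0 h1]
  simp

-- A's body equals the reference on every nonempty (sorted) list
theorem pvBody_eq (r0 : Int × Int × Int) (tl : List (Int × Int × Int)) :
    pvBodyA (r0 :: tl) = pvRef (r0 :: tl) := by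
  unfold pvBodyA pvRef
  rw [PySem.List.pyGet?_zero_cons]
  simp only
  set t := ((PySem.List.enumerate (r0 :: tl) 0).foldl pvStepA ([0], r0.1)).1 with ht
  have hcorr : ((r0 :: tl).foldl pvStepS ([], none)).1 = t.map (pvF (r0 :: tl)) := by
    have e1 : PySem.List.enumerate (r0 :: tl) 0 = (0, r0) :: PySem.List.enumerate tl 1 := by
      rw [PySem.List.enumerate_cons]; norm_num
    have step1 : pvStepS (([] : List Int), (none : Option Int)) r0 = ([r0.2.2], some r0.1) := by
      simp [pvStepS]
    have stepA1 : pvStepA (([0] : List Int), r0.1) (0, r0) = ([0], r0.1) := by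
      simp [pvStepA]
    have htl : tl = (PySem.List.enumerate tl 1).map Prod.snd :=
      (PySem.List.map_snd_enumerate tl 1).symm
    have hbase : ([r0.2.2] : List Int) = ([0] : List Int).map (pvF (r0 :: tl)) := by
      simp [pvF, PySem.List.pyGetD_zero_cons]
    calc ((r0 :: tl).foldl pvStepS ([], none)).1
        = (tl.foldl pvStepS ([r0.2.2], some r0.1)).1 := by rw [List.foldl_cons, step1]
      _ = ((((PySem.List.enumerate tl 1).map Prod.snd).foldl pvStepS
             (([0] : List Int).map (pvF (r0 :: tl)), some r0.1))).1 := by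
            rw [← htl, ← hbase]
      _ = t.map (pvF (r0 :: tl)) := by
            rw [pv_loop_corr (r0 :: tl) _ [0] r0.1 (pv_enum_lookup r0 tl), ht, e1,
               List.foldl_cons, stepA1]
  rw [hcorr]
  -- tracker is nonempty
  obtain ⟨ext, hext⟩ := pvStepA_prefix (PySem.List.enumerate (r0 :: tl) 0) [0] r0.1
  have hL : 1 ≤ t.length := by rw [ht, hext]; simp
  -- A's second loop as a map over pyRange
  rw [PySem.List.foldl_append_singleton_eq_map, PySem.List.slice_to_neg_one,
      PySem.List.enumerate_eq_map_pyRange t.dropLast (0 : Int), List.map_map,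
      List.nil_append]
  have hlen : ((t.dropLast.length : Nat) : Int) = ((t.map (pvF (r0 :: tl))).length : Int) - 1 := by
    simp [List.length_dropLast]; omega
  rw [show PySem.List.len t.dropLast = ((t.map (pvF (r0 :: tl))).length : Int) - 1 from by
        simpa [PySem.List.len] using hlen]
  apply List.map_congr_left
  intro n hn
  rw [PySem.List.mem_pyRange_one] at hn
  have hn1 : n < (t.length : Int) - 1 := by simpa using hn.2
  have g1 : PySem.List.pyGetD (t.map (pvF (r0 :: tl))) n 0
      = pvF (r0 :: tl) (PySem.List.pyGetD t n 0) :=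
    pv_pyGetD_map t _ n hn.1 (by omega)
  have g2 : PySem.List.pyGetD (t.map (pvF (r0 :: tl))) (n + 1) 0
      = pvF (r0 :: tl) (PySem.List.pyGetD t (n + 1) 0) :=
    pv_pyGetD_map t _ (n + 1) (by omega) (by omega)
  simp [g1, g2, pvF]

-- ---------- sortedness of sorted2's output ----------

-- the comparison sorted2 uses for key (r.1, r.2.2)
def pvLt (a b : Int × Int × Int) : Bool :=
  decide (a.1 < b.1) || (!decide (b.1 < a.1) && decide (a.2.2 < b.2.2))

theorem pvLt_false_iff (a b : Int × Int × Int) :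
    (pvLt b a = false) ↔ (a.1 < b.1 ∨ (a.1 = b.1 ∧ a.2.2 ≤ b.2.2)) := by
  simp [pvLt]; omega

theorem pvLt_asymm (a b : Int × Int × Int) (h : pvLt a b = true) : pvLt b a = false := by
  simp [pvLt] at h ⊢; omega

theorem pvLt_le_trans (a b c : Int × Int × Int) (h1 : pvLt b a = false)
    (h2 : pvLt c b = false) : pvLt c a = false := by
  simp [pvLt] at h1 h2 ⊢; omega

theorem pv_insertBy_pairwise (x : Int × Int × Int) (ys : List (Int × Int × Int))
    (h : ys.Pairwise (fun a b => pvLt b a = false)) :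
    (PySem.List.insertBy pvLt x ys).Pairwise (fun a b => pvLt b a = false) := by
  induction ys with
  | nil => simp [PySem.List.insertBy]
  | cons y ys ih =>
    rw [List.pairwise_cons] at h
    obtain ⟨hy, hys⟩ := h
    by_cases hxy : pvLt x y = true
    · rw [show PySem.List.insertBy pvLt x (y :: ys) = x :: y :: ys from by
          simp [PySem.List.insertBy, hxy]]
      rw [List.pairwise_cons]
      refine ⟨?_, List.pairwise_cons.mpr ⟨hy, hys⟩⟩
      intro z hz
      rcases List.mem_cons.mp hz with rfl | hz
      · exact pvLt_asymm x z hxy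
      · exact pvLt_le_trans x y z (pvLt_asymm x y hxy) (hy z hz)
    · have hxy' : pvLt x y = false := by
        cases hv : pvLt x y
        · rfl
        · exact absurd hv hxy
      rw [show PySem.List.insertBy pvLt x (y :: ys) = y :: PySem.List.insertBy pvLt x ys from by
          simp [PySem.List.insertBy, hxy']]
      rw [List.pairwise_cons]
      refine ⟨?_, ih hys⟩
      intro z hz
      rcases (PySem.List.insertBy_mem_iff pvLt x z ys).mp hz with rfl | hz
      · exact hxy'
      · exact hy z hz

theorem pv_foldl_insertBy_pairwise (l : List (Int × Int × Int)) (acc : List (Int × Int × Int))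
    (hacc : acc.Pairwise (fun a b => pvLt b a = false)) :
    (l.foldl (fun acc x => PySem.List.insertBy pvLt x acc) acc).Pairwise
      (fun a b => pvLt b a = false) := by
  induction l generalizing acc with
  | nil => exact hacc
  | cons x l ih => exact ih _ (pv_insertBy_pairwise x acc hacc)

theorem pv_sorted2_pairwise (data : List (Int × Int × Int)) :
    (PySem.List.sorted2 data (fun r => r.1) (fun r => r.2.2)).Pairwise
      (fun a b => pvLt b a = false) := by
  rw [show PySem.List.sorted2 data (fun r => r.1) (fun r => r.2.2)
      = data.foldl (fun acc x => PySem.List.insertBy pvLt x acc) [] from rfl]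
  exact pv_foldl_insertBy_pairwise data [] (by simp)

-- ---------- group firsts of a lex-sorted list ----------

def pvGfT (k : Int) : List (Int × Int × Int) → List (Int × Int)
  | [] => []
  | x :: xs => if x.1 = k then pvGfT k xs else (x.1, x.2.2) :: pvGfT x.1 xs

def pvGf : List (Int × Int × Int) → List (Int × Int)
  | [] => []
  | x :: xs => (x.1, x.2.2) :: pvGfT x.1 xs

-- column-2 values of the rows with first component j
def pvVals (l : List (Int × Int × Int)) (j : Int) : List Int :=
  (l.filter (fun y => decide (y.1 = j))).map (fun y => y.2.2)

theorem pv_scanT (xs : List (Int × Int × Int)) (acc : List Int) (k : Int) :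
    (xs.foldl pvStepS (acc, some k)).1 = acc ++ (pvGfT k xs).map (fun p => p.2) := by
  induction xs generalizing acc k with
  | nil => simp [pvGfT]
  | cons x xs ih =>
    simp only [List.foldl_cons, pvStepS]
    by_cases h : x.1 = k
    · rw [if_neg (by simp [h]), ih acc k]
      simp [pvGfT, h]
    · rw [if_pos (by simp only [ne_eq, Option.some.injEq]; exact fun hh => h hh.symm),
          ih (acc ++ [x.2.2]) x.1]
      simp [pvGfT, h, List.append_assoc]

theorem pv_scan (d : List (Int × Int × Int)) :
    (d.foldl pvStepS ([], none)).1 = (pvGf d).map (fun p => p.2) := by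
  cases d with
  | nil => simp [pvGf]
  | cons x xs =>
    simp only [List.foldl_cons, pvStepS]
    rw [if_pos (by simp)]
    simp only [List.nil_append]
    rw [pv_scanT xs [x.2.2] x.1]
    simp [pvGf]

theorem pv_le_of_pvLt_false (x y : Int × Int × Int) (h : pvLt y x = false) : x.1 ≤ y.1 := by
  rcases (pvLt_false_iff x y).mp h with h1 | ⟨h1, _⟩ <;> omega

theorem pvGfT_keys (xs : List (Int × Int × Int)) (k : Int)
    (hpw : xs.Pairwise (fun a b => pvLt b a = false)) (hall : ∀ y ∈ xs, k ≤ y.1) :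
    (pvGfT k xs).Pairwise (fun p q => p.1 < q.1) ∧ ∀ p ∈ pvGfT k xs, k < p.1 := by
  induction xs generalizing k with
  | nil => simp [pvGfT]
  | cons x xs ih =>
    rw [List.pairwise_cons] at hpw
    obtain ⟨hx, hxs⟩ := hpw
    have hle : ∀ y ∈ xs, x.1 ≤ y.1 := fun y hy => pv_le_of_pvLt_false x y (hx y hy)
    by_cases h : x.1 = k
    · simp only [pvGfT, if_pos h]
      exact ih k hxs (fun y hy => hall y (List.mem_cons_of_mem x hy))
    · simp only [pvGfT, if_neg h]
      obtain ⟨ihpw, ihgt⟩ := ih x.1 hxs hle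
      have hkx : k < x.1 := by
        have := hall x (List.mem_cons_self ..)
        omega
      constructor
      · rw [List.pairwise_cons]
        exact ⟨fun q hq => ihgt q hq, ihpw⟩
      · intro p hp
        rcases List.mem_cons.mp hp with rfl | hp
        · exact hkx
        · have := ihgt p hp; omega

theorem pvGfT_mem (xs : List (Int × Int × Int)) (k : Int)
    (hpw : xs.Pairwise (fun a b => pvLt b a = false)) (hall : ∀ y ∈ xs, k ≤ y.1) (j : Int) :
    (j ∈ (pvGfT k xs).map (fun p => p.1)) ↔ (j ∈ xs.map (fun y => y.1) ∧ j ≠ k) := by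
  induction xs generalizing k with
  | nil => simp [pvGfT]
  | cons x xs ih =>
    rw [List.pairwise_cons] at hpw
    obtain ⟨hx, hxs⟩ := hpw
    have hle : ∀ y ∈ xs, x.1 ≤ y.1 := fun y hy => pv_le_of_pvLt_false x y (hx y hy)
    by_cases h : x.1 = k
    · simp only [pvGfT, if_pos h]
      rw [ih k hxs (fun y hy => hall y (List.mem_cons_of_mem x hy)), List.map_cons,
        List.mem_cons]
      constructor
      · rintro ⟨hj, hjk⟩
        exact ⟨Or.inr hj, hjk⟩
      · rintro ⟨hj, hjk⟩
        rcases hj with heq | hj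
        · exact absurd (heq.trans h) hjk
        · exact ⟨hj, hjk⟩
    · simp only [pvGfT, if_neg h]
      have hkx : k < x.1 := by
        have := hall x (List.mem_cons_self ..)
        omega
      rw [List.map_cons, List.mem_cons, ih x.1 hxs hle, List.map_cons, List.mem_cons]
      constructor
      · rintro (rfl | ⟨hj, hjne⟩)
        · exact ⟨Or.inl rfl, by omega⟩
        · rw [List.mem_map] at hj
          obtain ⟨y, hy, rfl⟩ := hj
          have := hle y hy
          exact ⟨Or.inr (List.mem_map.mpr ⟨y, hy, rfl⟩), by omega⟩
      · rintro ⟨rfl | hj, hjk⟩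
        · exact Or.inl rfl
        · by_cases hjx : j = x.1
          · exact Or.inl hjx
          · exact Or.inr ⟨hj, hjx⟩

theorem pvGfT_val (xs : List (Int × Int × Int)) (k : Int)
    (hpw : xs.Pairwise (fun a b => pvLt b a = false)) (hall : ∀ y ∈ xs, k ≤ y.1) :
    ∀ p ∈ pvGfT k xs, ∃ rest, pvVals xs p.1 = p.2 :: rest ∧ ∀ v ∈ rest, p.2 ≤ v := by
  induction xs generalizing k with
  | nil => simp [pvGfT]
  | cons x xs ih =>
    rw [List.pairwise_cons] at hpw
    obtain ⟨hx, hxs⟩ := hpw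
    have hle : ∀ y ∈ xs, x.1 ≤ y.1 := fun y hy => pv_le_of_pvLt_false x y (hx y hy)
    by_cases h : x.1 = k
    · simp only [pvGfT, if_pos h]
      intro p hp
      have hall' : ∀ y ∈ xs, k ≤ y.1 := fun y hy => hall y (List.mem_cons_of_mem x hy)
      have hkp : k < p.1 := (pvGfT_keys xs k hxs hall').2 p hp
      obtain ⟨rest, hr, hb⟩ := ih k hxs hall' p hp
      refine ⟨rest, ?_, hb⟩
      rw [← hr]
      simp [pvVals, show ¬ x.1 = p.1 by omega]
    · simp only [pvGfT, if_neg h]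
      intro p hp
      rcases List.mem_cons.mp hp with rfl | hp
      · refine ⟨pvVals xs x.1, ?_, ?_⟩
        · simp [pvVals]
        · intro v hv
          rw [pvVals, List.mem_map] at hv
          obtain ⟨y, hy, rfl⟩ := hv
          rw [List.mem_filter] at hy
          obtain ⟨hy, hy1⟩ := hy
          have hy1' : y.1 = x.1 := by simpa using hy1
          rcases (pvLt_false_iff x y).mp (hx y hy) with h1 | ⟨_, h2⟩
          · omega
          · exact h2
      · have hxp : x.1 < p.1 := (pvGfT_keys xs x.1 hxs hle).2 p hp
        obtain ⟨rest, hr, hb⟩ := ih x.1 hxs hle p hp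
        refine ⟨rest, ?_, hb⟩
        rw [← hr]
        simp [pvVals, show ¬ x.1 = p.1 by omega]

theorem pvGf_keys (d : List (Int × Int × Int))
    (hpw : d.Pairwise (fun a b => pvLt b a = false)) :
    ((pvGf d).map (fun p => p.1)).Pairwise (· < ·) := by
  cases d with
  | nil => simp [pvGf]
  | cons x xs =>
    rw [List.pairwise_cons] at hpw
    obtain ⟨hx, hxs⟩ := hpw
    have hle : ∀ y ∈ xs, x.1 ≤ y.1 := fun y hy => pv_le_of_pvLt_false x y (hx y hy)
    obtain ⟨hK, hgt⟩ := pvGfT_keys xs x.1 hxs hle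
    simp only [pvGf, List.map_cons]
    rw [List.pairwise_cons]
    constructor
    · intro j hj
      rw [List.mem_map] at hj
      obtain ⟨q, hq, rfl⟩ := hj
      exact hgt q hq
    · exact List.pairwise_map.mpr hK

theorem pvGf_mem (d : List (Int × Int × Int))
    (hpw : d.Pairwise (fun a b => pvLt b a = false)) (j : Int) :
    j ∈ (pvGf d).map (fun p => p.1) ↔ j ∈ d.map (fun y => y.1) := by
  cases d with
  | nil => simp [pvGf]
  | cons x xs =>
    rw [List.pairwise_cons] at hpw
    obtain ⟨hx, hxs⟩ := hpw
    have hle : ∀ y ∈ xs, x.1 ≤ y.1 := fun y hy => pv_le_of_pvLt_false x y (hx y hy)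
    simp only [pvGf, List.map_cons, List.mem_cons]
    rw [pvGfT_mem xs x.1 hxs hle j]
    constructor
    · rintro (rfl | ⟨hj, _⟩)
      · exact Or.inl rfl
      · exact Or.inr hj
    · rintro (rfl | hj)
      · exact Or.inl rfl
      · by_cases hjx : j = x.1
        · exact Or.inl hjx
        · exact Or.inr ⟨hj, hjx⟩

theorem pvGf_val (d : List (Int × Int × Int))
    (hpw : d.Pairwise (fun a b => pvLt b a = false)) :
    ∀ p ∈ pvGf d, ∃ rest, pvVals d p.1 = p.2 :: rest ∧ ∀ v ∈ rest, p.2 ≤ v := by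
  cases d with
  | nil => simp [pvGf]
  | cons x xs =>
    rw [List.pairwise_cons] at hpw
    obtain ⟨hx, hxs⟩ := hpw
    have hle : ∀ y ∈ xs, x.1 ≤ y.1 := fun y hy => pv_le_of_pvLt_false x y (hx y hy)
    intro p hp
    rcases List.mem_cons.mp hp with rfl | hp
    · refine ⟨pvVals xs x.1, ?_, ?_⟩
      · simp [pvVals]
      · intro v hv
        rw [pvVals, List.mem_map] at hv
        obtain ⟨y, hy, rfl⟩ := hv
        rw [List.mem_filter] at hy
        obtain ⟨hy, hy1⟩ := hy
        have hy1' : y.1 = x.1 := by simpa using hy1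
        rcases (pvLt_false_iff x y).mp (hx y hy) with h1 | ⟨_, h2⟩
        · omega
        · exact h2
    · have hxp : x.1 < p.1 := (pvGfT_keys xs x.1 hxs hle).2 p hp
      obtain ⟨rest, hr, hb⟩ := pvGfT_val xs x.1 hxs hle p hp
      refine ⟨rest, ?_, hb⟩
      rw [← hr]
      simp [pvVals, show ¬ x.1 = p.1 by omega]

-- ---------- the dict of minima ----------

def pvOmin (o : Option Int) (v : Int) : Option Int :=
  some (o.elim v (fun c => min c v))

theorem pv_mins_get? (l : List (Int × Int × Int)) (d : PySem.Dict Int Int) (k : Int) :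
    (l.foldl pvStepM d).get? k = (pvVals l k).foldl pvOmin (d.get? k) := by
  induction l generalizing d with
  | nil => simp [pvVals]
  | cons r l ih =>
    simp only [List.foldl_cons, pvStepM]
    by_cases hk : r.1 = k
    · subst hk
      have hvals : pvVals (r :: l) r.1 = r.2.2 :: pvVals l r.1 := by
        simp [pvVals]
      cases hc : d.get? r.1 with
      | none =>
        have hcont : d.contains r.1 = false := (PySem.Dict.get?_eq_none_iff_contains d r.1).mp hc
        rw [if_pos (by simp [hcont]), ih, PySem.Dict.get?_insert_self, hvals]
        simp [pvOmin]
      | some c =>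
        have hcont : d.contains r.1 = true := by
          cases hb : d.contains r.1
          · rw [(PySem.Dict.get?_eq_none_iff_contains d r.1).mpr hb] at hc
            cases hc
          · rfl
        have hgd : d.getD r.1 0 = c := PySem.Dict.getD_of_get?_eq_some d 0 hc
        by_cases hv : r.2.2 < c
        · rw [if_pos (by simp [hcont, hgd, hv]), ih, PySem.Dict.get?_insert_self, hvals]
          simp only [List.foldl_cons, pvOmin, Option.elim]
          rw [min_eq_right (le_of_lt hv)]
        · rw [if_neg (by simp [hcont, hgd]; omega), ih, hvals, hc]
          simp only [List.foldl_cons, pvOmin, Option.elim]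
          rw [min_eq_left (le_of_not_gt hv)]
    · have hvals : pvVals (r :: l) k = pvVals l k := by
        simp [pvVals, hk]
      rw [hvals]
      split
      · rw [ih, PySem.Dict.get?_insert_of_ne _ _ (fun hkr => hk hkr.symm)]
      · rw [ih]

theorem pv_omin_fold (l : List Int) (c : Int) :
    l.foldl pvOmin (some c) = some (l.foldl min c) := by
  induction l generalizing c with
  | nil => rfl
  | cons v l ih => simp only [List.foldl_cons, pvOmin, Option.elim]; exact ih (min c v)

theorem pv_mins_keys (l : List (Int × Int × Int)) (d : PySem.Dict Int Int) :
    (l.foldl pvStepM d).keys = PySem.Set.update d.keys (l.map (fun r => r.1)) := by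
  induction l generalizing d with
  | nil => simp [PySem.Set.update]
  | cons r l ih =>
    simp only [List.foldl_cons, List.map_cons, pvStepM]
    have hupd : PySem.Set.update d.keys (r.1 :: l.map (fun r => r.1))
        = PySem.Set.update (PySem.Set.add d.keys r.1) (l.map (fun r => r.1)) := by
      simp [PySem.Set.update]
    cases hc : d.contains r.1 with
    | true =>
      have hmem : r.1 ∈ d.keys := (PySem.Dict.contains_iff_mem_keys d r.1).mp hc
      have hadd : PySem.Set.add d.keys r.1 = d.keys := PySem.Set.add_of_mem hmem
      split
      · rw [ih, PySem.Dict.keys_insert_of_contains d _ hc, hupd, hadd]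
      · rw [ih, hupd, hadd]
    | false =>
      have hnmem : r.1 ∉ d.keys :=
        fun hm => by simp [(PySem.Dict.contains_iff_mem_keys d r.1).mpr hm] at hc
      rw [if_pos (by simp), ih, PySem.Dict.keys_insert_of_not_contains d _ hc, hupd,
        PySem.Set.add_of_not_mem hnmem]

theorem pv_mins_nodup (l : List (Int × Int × Int)) (d : PySem.Dict Int Int)
    (h : d.keys.Nodup) : (l.foldl pvStepM d).keys.Nodup := by
  induction l generalizing d with
  | nil => exact h
  | cons r l ih =>
    simp only [List.foldl_cons, pvStepM]
    split
    · exact ih _ (PySem.Dict.nodup_keys_insert d r.1 r.2.2 h)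
    · exact ih _ h

-- ---------- assembly ----------

theorem pv_firsts_eq (data : List (Int × Int × Int)) :
    (PySem.List.sorted (PySem.Dict.keys (data.foldl pvStepM PySem.Dict.empty)) (fun k => k) false).map
       (fun k => PySem.Dict.getD (data.foldl pvStepM PySem.Dict.empty) k 0)
    = ((PySem.List.sorted2 data (fun r => r.1) (fun r => r.2.2)).foldl pvStepS ([], none)).1 := by
  set d := PySem.List.sorted2 data (fun r => r.1) (fun r => r.2.2) with hd
  set mins := data.foldl pvStepM PySem.Dict.empty with hm
  have hperm : d.Perm data := PySem.List.sorted2_perm data (fun r => r.1) (fun r => r.2.2) false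
  have hpw := pv_sorted2_pairwise data
  rw [← hd] at hpw
  have hkeys : mins.keys = PySem.Set.ofList (data.map (fun r => r.1)) := by
    rw [hm, pv_mins_keys data PySem.Dict.empty, PySem.Dict.keys_empty]
    rfl
  have hnd : mins.keys.Nodup := pv_mins_nodup data _ (by simp [PySem.Dict.keys_empty])
  have hK : ((pvGf d).map (fun p => p.1)).Pairwise (· < ·) := pvGf_keys d hpw
  have hKnd : ((pvGf d).map (fun p => p.1)).Nodup := hK.imp (fun h => ne_of_lt h)
  have hmem : ∀ j, j ∈ (pvGf d).map (fun p => p.1) ↔ j ∈ mins.keys := by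
    intro j
    rw [pvGf_mem d hpw j, hkeys, PySem.Set.mem_ofList]
    exact (hperm.map (fun y => y.1)).mem_iff
  have hperm2 : ((pvGf d).map (fun p => p.1)).Perm mins.keys :=
    List.perm_of_nodup_nodup_toFinset_eq hKnd hnd
      (by ext j; simp only [List.mem_toFinset]; exact hmem j)
  have hsorted : PySem.List.sorted mins.keys (fun k => k) false = (pvGf d).map (fun p => p.1) :=
    PySem.List.sorted_eq_of_perm_of_pairwise_lt _ _ _ hperm2 hK
  have hel : ∀ p ∈ pvGf d, PySem.Dict.getD mins p.1 0 = p.2 := by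
    intro p hp
    obtain ⟨rest, hr, hb⟩ := pvGf_val d hpw p hp
    have hvperm : (pvVals data p.1).Perm (pvVals d p.1) :=
      ((hperm.filter _).map _).symm
    cases hv : pvVals data p.1 with
    | nil =>
      rw [hv] at hvperm
      have : pvVals d p.1 = [] := hvperm.symm.eq_nil
      rw [this] at hr
      cases hr
    | cons w ws =>
      have hget : mins.get? p.1 = some (ws.foldl min w) := by
        rw [hm, pv_mins_get? data PySem.Dict.empty p.1, PySem.Dict.get?_empty, hv]
        rw [show ((w :: ws).foldl pvOmin none) = ws.foldl pvOmin (some w) from by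
            simp [pvOmin]]
        exact pv_omin_fold ws w
      have hmm : ws.foldl min w ∈ pvVals d p.1 := by
        apply hvperm.mem_iff.mp
        rw [hv]
        rcases PySem.List.foldl_min_mem ws w with h1 | h1
        · rw [h1]; exact List.mem_cons_self ..
        · exact List.mem_cons_of_mem w h1
      have hp2 : p.2 ∈ (w :: ws) := by
        rw [← hv]
        apply hvperm.mem_iff.mpr
        rw [hr]
        exact List.mem_cons_self ..
      have hle1 : ws.foldl min w ≤ p.2 := by
        obtain ⟨hw, hall2⟩ := PySem.List.foldl_min_le ws w
        rcases List.mem_cons.mp hp2 with rfl | hh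
        · exact hw
        · exact hall2 _ hh
      have hle2 : p.2 ≤ ws.foldl min w := by
        rw [hr] at hmm
        rcases List.mem_cons.mp hmm with hh | hh
        · omega
        · exact hb _ hh
      rw [PySem.Dict.getD_of_get?_eq_some _ 0 hget]
      omega
  rw [pv_scan d, hsorted, List.map_map]
  exact List.map_congr_left (fun p hp => hel p hp)

theorem pv_alt_eq_ref (data : List (Int × Int × Int)) :
    eachIterationTime_alt data = pvRef (PySem.List.sorted2 data (fun r => r.1) (fun r => r.2.2)) := by
  exact congrArg
    (fun f : List Int => (PySem.List.pyRange 0 ((f.length : Int) - 1) 1).map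
      (fun n => (n, PySem.List.pyGetD f (n + 1) 0 - PySem.List.pyGetD f n 0)))
    (pv_firsts_eq data)

-- ===== VERDICT (by name: the statements are the Claim_ definitions above) =====
theorem eachIterationTime_spec : Claim_equal_eachIterationTime := by
  intro data _ hpre
  unfold Spec_eachIterationTime eachIterationTime
  rw [pv_alt_eq_ref data]
  have hdne : PySem.List.sorted2 data (fun r => r.1) (fun r => r.2.2) ≠ [] := by
    intro h
    have p := PySem.List.sorted2_perm data (fun r => r.1) (fun r => r.2.2) false
    rw [h] at p
    exact hpre p.symm.eq_nil
  cases hs : PySem.List.sorted2 data (fun r => r.1) (fun r => r.2.2) with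
  | nil => exact absurd hs hdne
  | cons r0 tl => exact pvBody_eq r0 tl
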